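-- pv_equiv track=rewrite | github.com/MaverickPoly/python-dsa-practices | Robocontest/olymp10.py | calc
-- ===== SOURCE A (Python) =====
-- def equal(lst):
--     return all(x == lst[0] for x in lst)
--
-- def calc(lst, n):
--     count = 0
--     while not equal(lst):
--         m = max(lst)
--         for i in range(n):
--             if lst[i] == m:
--                 continue
--             lst[i] += 1
--         count += 1
--     return count
-- ===== SOURCE B (Python) =====
-- def calc(lst, n):
--     if not lst:
--         return 0
--     return max(lst) - min(lst)
-- ===== Notes on version B (the rewrite author's own statement) =====
-- stated objective: simpler
-- what changed: Replaces the simulation loop (repeatedly increment every non-maximal element until all are equal) by the closed form max(lst) - min(lst), since each round raises the minimum by exactly 1 while the maximum is unchanged.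
import Mathlib
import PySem

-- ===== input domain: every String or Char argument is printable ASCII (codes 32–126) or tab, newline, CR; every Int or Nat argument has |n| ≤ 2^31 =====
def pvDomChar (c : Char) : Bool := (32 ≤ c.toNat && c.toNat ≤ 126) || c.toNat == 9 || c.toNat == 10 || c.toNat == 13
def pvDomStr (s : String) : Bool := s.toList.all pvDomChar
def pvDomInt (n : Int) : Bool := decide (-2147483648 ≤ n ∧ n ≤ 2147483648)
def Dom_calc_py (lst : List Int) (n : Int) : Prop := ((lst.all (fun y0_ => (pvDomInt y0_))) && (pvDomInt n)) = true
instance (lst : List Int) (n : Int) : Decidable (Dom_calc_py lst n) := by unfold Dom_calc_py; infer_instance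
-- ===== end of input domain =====

-- B replaces A's round-by-round simulation by the closed form max - min; A mutates lst in
-- place, B does not — the equivalence proved is about the return value only.

-- ===== PORT A =====
-- max(lst) / min(lst) with a default that is never read inside Pre_ (Python raises ValueError on []
-- only on paths Pre_ excludes / that are unreachable):
def pyMax (lst : List Int) : Int := (PySem.List.max? lst (fun y => y)).getD 0
def pyMin (lst : List Int) : Int := (PySem.List.min? lst (fun y => y)).getD 0

-- all(x == lst[0] for x in lst); on [] the generator is empty so lst[0] is never read (headD's
-- default is likewise never read)
def equalA (lst : List Int) : Bool := lst.all (fun x => decide (x = lst.headD 0))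

-- one pass of the inner 'for i in range(n)' loop; pyGet? = none is Python's IndexError (outside Pre_)
def stepA (m : Int) (n : Int) (lst : List Int) : List Int :=
  (PySem.List.pyRange 0 n 1).foldl
    (fun l i =>
      match PySem.List.pyGet? l i with
      | some v => if v = m then l else l.set i.toNat (v + 1)
      | none => l)
    lst

-- the while loop; fuel (max-min)+1 is exactly enough for every terminating run of Python's loop
def loopA (fuel : Nat) (lst : List Int) (n : Int) (count : Int) : Int :=
  match fuel with
  | 0 => count
  | fuel' + 1 =>
      if equalA lst then count
      else loopA fuel' (stepA (pyMax lst) n lst) n (count + 1)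

def calc_py (lst : List Int) (n : Int) : Int :=
  loopA ((pyMax lst - pyMin lst).toNat + 1) lst n 0

-- ===== PORT B =====
def calc_py_alt (lst : List Int) (n : Int) : Int :=
  if lst = [] then 0 else pyMax lst - pyMin lst

-- ===== PRECONDITION & SPEC =====
-- Pre_ is exactly the set of inputs on which Python's A terminates normally: either the list is
-- already constant (A returns 0 at once, for any n), or 1 ≤ n ≤ len(lst) and every element past
-- index n already equals the maximum (otherwise A raises IndexError for n > len, or loops forever
-- because an untouched sub-maximal element keeps equal() false).
def Pre_calc_py (lst : List Int) (n : Int) : Prop :=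
  (∀ x ∈ lst, x = lst.headD 0) ∨
  (1 ≤ n ∧ n ≤ (lst.length : Int) ∧ ∀ x ∈ lst.drop n.toNat, x = pyMax lst)
instance (lst : List Int) (n : Int) : Decidable (Pre_calc_py lst n) := by
  unfold Pre_calc_py; infer_instance

def pvWitness_calc_py : List Int × Int := ([0, 3, 1], 3)

def Spec_calc_py (lst : List Int) (n : Int) (out : Int) : Prop := out = calc_py_alt lst n
instance (lst : List Int) (n : Int) (out : Int) : Decidable (Spec_calc_py lst n out) := by
  unfold Spec_calc_py; infer_instance

-- ===== CLAIM (what is proved, stated in full; the proofs are below) =====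
def Claim_equal_calc_py : Prop := ∀ (lst : List Int) (n : Int), Dom_calc_py lst n → Pre_calc_py lst n → Spec_calc_py lst n (calc_py lst n)

-- ===== LEMMAS AND PROOFS =====

theorem pyMax_cons (x : Int) (t : List Int) : pyMax (x :: t) = t.foldl max x := by
  simp [pyMax, PySem.List.max?_id_cons]

theorem pyMin_cons (x : Int) (t : List Int) : pyMin (x :: t) = t.foldl min x := by
  simp [pyMin, PySem.List.min?_id_cons]

theorem pyMax_mem (lst : List Int) (h : lst ≠ []) : pyMax lst ∈ lst := by
  cases lst with
  | nil => simp at h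
  | cons x t =>
      rw [pyMax_cons]
      rcases PySem.List.foldl_max_mem t x with h1 | h1
      · rw [h1]; exact List.mem_cons_self
      · exact List.mem_cons_of_mem _ h1

theorem le_pyMax (lst : List Int) (x : Int) (hx : x ∈ lst) : x ≤ pyMax lst := by
  cases lst with
  | nil => simp at hx
  | cons y t =>
      rw [pyMax_cons]
      rcases List.mem_cons.mp hx with rfl | hx
      · exact (PySem.List.le_foldl_max t x).1
      · exact (PySem.List.le_foldl_max t y).2 x hx

theorem pyMin_mem (lst : List Int) (h : lst ≠ []) : pyMin lst ∈ lst := by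
  cases lst with
  | nil => simp at h
  | cons x t =>
      rw [pyMin_cons]
      rcases PySem.List.foldl_min_mem t x with h1 | h1
      · rw [h1]; exact List.mem_cons_self
      · exact List.mem_cons_of_mem _ h1

theorem pyMin_le (lst : List Int) (x : Int) (hx : x ∈ lst) : pyMin lst ≤ x := by
  cases lst with
  | nil => simp at hx
  | cons y t =>
      rw [pyMin_cons]
      rcases List.mem_cons.mp hx with rfl | hx
      · exact (PySem.List.foldl_min_le t x).1
      · exact (PySem.List.foldl_min_le t y).2 x hx

theorem equalA_iff (lst : List Int) :
    equalA lst = true ↔ ∀ x ∈ lst, x = lst.headD 0 := by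
  simp [equalA]

-- a constant list has max = min
theorem equal_max_eq_min (lst : List Int) (hne : lst ≠ [])
    (h : ∀ x ∈ lst, x = lst.headD 0) : pyMax lst = pyMin lst := by
  have h1 := h _ (pyMax_mem lst hne)
  have h2 := h _ (pyMin_mem lst hne)
  rw [h1, h2]

-- a non-constant list has min < max
theorem min_lt_max_of_not_equal (lst : List Int) (hne : lst ≠ [])
    (h : ¬ ∀ x ∈ lst, x = lst.headD 0) : pyMin lst < pyMax lst := by
  push Not at h
  obtain ⟨x, hx, hxh⟩ := h
  have hhd : lst.headD 0 ∈ lst := by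
    cases lst with
    | nil => simp at hne
    | cons y t => simp
  rcases lt_or_ge (pyMin lst) (pyMax lst) with h1 | h1
  · exact h1
  · exfalso
    have hall : ∀ y ∈ lst, y = pyMax lst := fun y hy =>
      le_antisymm (le_pyMax lst y hy) (le_trans h1 (pyMin_le lst y hy))
    exact hxh ((hall x hx).trans (hall _ hhd).symm)

-- one pass of the inner loop is a pointwise map on the first n elements
theorem stepA_take (m : Int) (lst : List Int) :
    ∀ (k : Nat), k ≤ lst.length →
      stepA m (k : Int) lst =
        (lst.take k).map (fun x => if x = m then x else x + 1) ++ lst.drop k := by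
  intro k
  induction k with
  | zero => intro _; simp [stepA, PySem.List.pyRange_one_eq_nil]
  | succ k ih =>
      intro hk
      have hk' : k ≤ lst.length := Nat.le_of_succ_le hk
      have hklt : k < lst.length := hk
      have hsplit : PySem.List.pyRange 0 ((k : Int) + 1) 1 =
          PySem.List.pyRange 0 (k : Int) 1 ++ [(k : Int)] := by
        exact PySem.List.pyRange_one_succ_right (by positivity)
      have hcast : ((k + 1 : Nat) : Int) = (k : Int) + 1 := by push_cast; ring
      unfold stepA
      rw [hcast, hsplit, List.foldl_append]
      have hprev := ih hk'
      unfold stepA at hprev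
      rw [hprev]
      set f := fun x : Int => if x = m then x else x + 1 with hf
      have hlen : ((lst.take k).map f).length = k := by
        simp [List.length_take, Nat.min_eq_left hk']
      have hdrop : lst.drop k = lst[k] :: lst.drop (k + 1) :=
        (List.drop_eq_getElem_cons hklt)
      have hget : PySem.List.pyGet? ((lst.take k).map f ++ lst.drop k) (k : Int)
          = some lst[k] := by
        rw [hdrop]
        have h0 := PySem.List.pyGet?_append_length ((lst.take k).map f) (lst.drop (k+1)) lst[k]
        rw [hlen] at h0
        exact h0
      simp only [List.foldl_cons, List.foldl_nil, hget]
      have htake : lst.take (k + 1) = lst.take k ++ [lst[k]] :=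
        List.take_succ_eq_append_getElem hklt
      have hkt : ((k : Int)).toNat = k := by simp
      by_cases hv : lst[k] = m
      · rw [htake, hdrop]
        simp [hf, hv]
      · have hset : (((lst.take k).map f ++ lst[k] :: lst.drop (k+1)).set
            ((k : Int)).toNat (lst[k] + 1))
            = (lst.take k).map f ++ (lst[k] + 1) :: lst.drop (k+1) := by
          rw [hkt, List.set_append_right k (lst[k] + 1) (by omega), hlen]
          simp
          rw [hdrop]
          rfl
        rw [hdrop, if_neg hv, hset, htake]
        simp [hf]
        rw [List.take_succ_eq_append_getElem (by simpa using hklt)]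
        simp [hv]

-- under the Pre_ invariant the whole pass is lst.map f
theorem stepA_eq_map (m : Int) (n : Int) (lst : List Int)
    (h1 : 0 ≤ n) (h2 : n ≤ (lst.length : Int))
    (h3 : ∀ x ∈ lst.drop n.toNat, x = m) :
    stepA m n lst = lst.map (fun x => if x = m then x else x + 1) := by
  have hn : n = ((n.toNat : Nat) : Int) := by omega
  have hk : n.toNat ≤ lst.length := by omega
  rw [hn, stepA_take m lst n.toNat hk]
  have hdm : (lst.drop n.toNat).map (fun x => if x = m then x else x + 1)
      = lst.drop n.toNat := by
    have h4 : (lst.drop n.toNat).map (fun x => if x = m then x else x + 1)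
        = (lst.drop n.toNat).map id :=
      List.map_congr_left (fun x hx => by simp [h3 x hx])
    rw [h4, List.map_id]
  conv_rhs => rw [← List.take_append_drop n.toNat lst]
  rw [List.map_append, hdm]

theorem max_map_step (lst : List Int) (hne : lst ≠ []) :
    pyMax (lst.map (fun x => if x = pyMax lst then x else x + 1)) = pyMax lst := by
  set M := pyMax lst with hM
  set L := lst.map (fun x => if x = M then x else x + 1) with hL
  have hneL : L ≠ [] := by simp [hL, hne]
  apply le_antisymm
  · have hmem := pyMax_mem L hneL
    rw [hL] at hmem
    obtain ⟨x, hx, hfx⟩ := List.mem_map.mp hmem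
    by_cases hxm : x = M
    · rw [← hfx]; simp [hxm]
    · have : x + 1 ≤ M := by
        have := le_pyMax lst x hx
        omega
      rw [← hfx]; simp [hxm]; omega
  · apply le_pyMax
    rw [hL]
    have : M ∈ lst := pyMax_mem lst hne
    exact List.mem_map.mpr ⟨M, this, by simp⟩

theorem min_map_step (lst : List Int) (hne : lst ≠ [])
    (hlt : pyMin lst < pyMax lst) :
    pyMin (lst.map (fun x => if x = pyMax lst then x else x + 1)) = pyMin lst + 1 := by
  set M := pyMax lst with hM
  set L := lst.map (fun x => if x = M then x else x + 1) with hL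
  have hneL : L ≠ [] := by simp [hL, hne]
  apply le_antisymm
  · apply pyMin_le
    have hm : pyMin lst ∈ lst := pyMin_mem lst hne
    rw [hL]
    refine List.mem_map.mpr ⟨pyMin lst, hm, ?_⟩
    have : pyMin lst ≠ M := by omega
    simp [this]
  · have hmem := pyMin_mem L hneL
    rw [hL] at hmem
    obtain ⟨x, hx, hfx⟩ := List.mem_map.mp hmem
    have hge := pyMin_le lst x hx
    by_cases hxm : x = M
    · rw [← hfx]; simp [hxm]; omega
    · rw [← hfx]; simp [hxm]; omega

-- the drop-invariant is preserved by one pass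
theorem drop_inv_step (lst : List Int) (n : Int) (hne : lst ≠ [])
    (h3 : ∀ x ∈ lst.drop n.toNat, x = pyMax lst) :
    ∀ x ∈ (lst.map (fun x => if x = pyMax lst then x else x + 1)).drop n.toNat,
      x = pyMax (lst.map (fun x => if x = pyMax lst then x else x + 1)) := by
  intro x hx
  rw [max_map_step lst hne]
  rw [← List.map_drop] at hx
  obtain ⟨y, hy, hfy⟩ := List.mem_map.mp hx
  have := h3 y hy
  rw [← hfy, this]
  simp

-- the main loop invariant: with enough fuel the loop returns count + (max - min)
theorem loopA_main (n : Int) (h1 : 1 ≤ n) :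
    ∀ (k : Nat) (lst : List Int) (count : Int),
      lst ≠ [] → n ≤ (lst.length : Int) →
      (∀ x ∈ lst.drop n.toNat, x = pyMax lst) →
      (pyMax lst - pyMin lst).toNat ≤ k →
      loopA (k + 1) lst n count = count + (pyMax lst - pyMin lst) := by
  intro k
  induction k with
  | zero =>
      intro lst count hne hlen hinv hfuel
      have hle : pyMin lst ≤ pyMax lst :=
        pyMin_le lst _ (pyMax_mem lst hne)
      by_cases heq : equalA lst = true
      · rw [equal_max_eq_min lst hne ((equalA_iff lst).mp heq)]
        simp [loopA, heq]
      · exfalso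
        have := min_lt_max_of_not_equal lst hne
          (fun h => heq ((equalA_iff lst).mpr h))
        omega
  | succ k ih =>
      intro lst count hne hlen hinv hfuel
      by_cases heq : equalA lst = true
      · rw [equal_max_eq_min lst hne ((equalA_iff lst).mp heq)]
        simp [loopA, heq]
      · have hlt : pyMin lst < pyMax lst :=
          min_lt_max_of_not_equal lst hne (fun h => heq ((equalA_iff lst).mpr h))
        have hstep : stepA (pyMax lst) n lst =
            lst.map (fun x => if x = pyMax lst then x else x + 1) :=
          stepA_eq_map (pyMax lst) n lst (by omega) hlen hinv
        have hrec : loopA (k + 1 + 1) lst n count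
            = loopA (k + 1) (stepA (pyMax lst) n lst) n (count + 1) := by
          simp [loopA, heq]
        rw [hrec, hstep]
        set L := lst.map (fun x => if x = pyMax lst then x else x + 1) with hL
        have hneL : L ≠ [] := by simp [hL, hne]
        have hlenL : n ≤ (L.length : Int) := by simp [hL]; exact_mod_cast hlen
        have hmaxL : pyMax L = pyMax lst := max_map_step lst hne
        have hminL : pyMin L = pyMin lst + 1 := min_map_step lst hne hlt
        have hinvL : ∀ x ∈ L.drop n.toNat, x = pyMax L := drop_inv_step lst n hne hinv
        have hfuelL : (pyMax L - pyMin L).toNat ≤ k := by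
          rw [hmaxL, hminL]; omega
        rw [ih L (count + 1) hneL hlenL hinvL hfuelL, hmaxL, hminL]
        ring

-- ===== VERDICT (by name: the statement is the Claim_ definition above) =====
theorem calc_py_spec : Claim_equal_calc_py := by
  intro lst n _ hpre
  unfold Spec_calc_py calc_py calc_py_alt
  by_cases hne : lst = []
  · subst hne
    simp [loopA, equalA]
  · simp only [if_neg hne]
    rcases hpre with heq | ⟨h1, h2, h3⟩
    · -- already constant: the loop exits at once with 0 = max - min
      have hmm : pyMax lst = pyMin lst := equal_max_eq_min lst hne heq
      have heqb : equalA lst = true := (equalA_iff lst).mpr heq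
      have hfuel : (pyMax lst - pyMin lst).toNat + 1 = 0 + 1 := by rw [hmm]; simp
      rw [hfuel]
      simp [loopA, heqb, hmm]
    · rw [loopA_main n h1 (pyMax lst - pyMin lst).toNat lst 0 hne h2 h3 le_rfl]
      ring
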